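-- pv_equiv track=rewrite | github.com/chatann/google-imageannotations | test.py | count_character_occurrences
-- ===== SOURCE A (Python) =====
-- def count_character_occurrences(compressed_data):
--     occurrences = {chr(i): 0 for i in range(ord('a'), ord('z')+1)}
--     stack = []
--     count = 0
--     coeff = 1
--
--     for char in compressed_data:
--         if char.isdigit():
--             count = count * 10 + int(char)
--         elif char == '(':
--             stack.append(count)
--             count = 0
--         elif char == ')':
--             stack = stack[:-1]
--         else:
--             if count != 0:
--                 coeff *= count
--                 count = 0
--             for n in stack:
--                 coeff *= n
--             occurrences[char] += coeff
--             coeff = 1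
--
--     return occurrences
-- ===== SOURCE B (Python) =====
-- def count_character_occurrences(compressed_data):
--     occurrences = dict.fromkeys("abcdefghijklmnopqrstuvwxyz", 0)
--     n = len(compressed_data)
--
--     def go(i, mult, count):
--         # process until an unconsumed ')' or end of input; return (index, pending count)
--         while i < n:
--             c = compressed_data[i]
--             if c.isdigit():
--                 count = count * 10 + int(c)
--                 i += 1
--             elif c == '(':
--                 i, count = go(i + 1, mult * count, 0)
--                 if i < n:
--                     i += 1  # consume the ')'
--             elif c == ')':
--                 return i, count
--             else:
--                 occurrences[c] += (count if count else 1) * mult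
--                 count = 0
--                 i += 1
--         return i, count
--
--     i, count = 0, 0
--     while i < n:
--         i, count = go(i, 1, count)
--         if i < n:
--             i += 1  # unmatched top-level ')' is a no-op in the original
--     return occurrences
-- ===== Notes on version B (the rewrite author's own statement) =====
-- stated objective: alternative
-- what changed: B replaces A's iterative scan with an explicit multiplier stack (rescanned at every letter) by a recursive-descent parser of the nesting structure that passes one cumulative multiplier per level, so each letter does one multiplication instead of a stack rescan (O(n) vs O(n*depth); not measurably faster on the random inputs timed).
import Mathlib
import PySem

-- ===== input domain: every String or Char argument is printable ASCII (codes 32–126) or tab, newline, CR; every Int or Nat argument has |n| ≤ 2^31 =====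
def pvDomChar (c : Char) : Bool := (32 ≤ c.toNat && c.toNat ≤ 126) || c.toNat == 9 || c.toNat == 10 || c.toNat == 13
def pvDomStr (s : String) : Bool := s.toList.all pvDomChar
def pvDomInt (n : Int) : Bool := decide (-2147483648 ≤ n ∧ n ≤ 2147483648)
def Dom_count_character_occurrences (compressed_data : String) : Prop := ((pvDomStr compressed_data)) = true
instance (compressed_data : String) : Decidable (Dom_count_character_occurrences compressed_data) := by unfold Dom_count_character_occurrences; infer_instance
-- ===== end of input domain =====

-- B replaces A's iterative loop with an explicit multiplier stack (rescanned at every letter)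
-- by a recursive-descent walk of the nesting structure that carries one cumulative multiplier
-- per level (alternative algorithm; asymptotically O(n) vs A's O(n * depth)).

-- ===== PORT A =====
-- the dict {chr(i): 0 for i in range(97, 123)}  (chr on 97..122 is Char.ofNat)
def ccoInit : PySem.Dict String Int :=
  (PySem.List.pyRange 97 123 1).foldl
    (fun d i => d.insert (String.singleton (Char.ofNat i.toNat)) 0) PySem.Dict.empty

-- one iteration of A's loop; state = (occurrences, stack, count, coeff).
-- int(char) on a digit char is ported as PySem.Int.ofChars? [c]; occurrences[char] += coeff is
-- Dict.modify (under Pre_ the key is always present, matching Python's KeyError-free runs).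
def ccoStepA (st : PySem.Dict String Int × List Int × Int × Int) (c : Char) :
    PySem.Dict String Int × List Int × Int × Int :=
  let (occ, stack, count, coeff) := st
  if PySem.Chars.isdigit c then
    (occ, stack, count * 10 + (PySem.Int.ofChars? [c]).getD 0, coeff)
  else if c = '(' then
    (occ, stack ++ [count], 0, coeff)
  else if c = ')' then
    (occ, PySem.List.slice stack none (some (-1)), count, coeff)
  else
    let coeff1 := if count ≠ 0 then coeff * count else coeff
    let count1 := if count ≠ 0 then 0 else count
    let coeff2 := stack.foldl (· * ·) coeff1
    (occ.modify (String.singleton c) 0 (· + coeff2), stack, count1, 1)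

def count_character_occurrences (compressed_data : String) : List (String × Int) :=
  (compressed_data.toList.foldl ccoStepA (ccoInit, ([] : List Int), 0, 1)).1.items

-- ===== PORT B =====
-- dict.fromkeys("abcdefghijklmnopqrstuvwxyz", 0)
def ccoInitB : PySem.Dict String Int :=
  "abcdefghijklmnopqrstuvwxyz".toList.foldl
    (fun d c => d.insert (String.singleton c) 0) PySem.Dict.empty

-- B's inner `go`: walk forward until an unconsumed ')' or the end of input; returns the
-- updated dict, the remaining characters (what Python returns as an index) and the pending
-- count.  The Python recursion is index-based and total; the fuel argument (always the
-- remaining length, see ccoGo_of_fuel below) only makes the same computation structural.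
def ccoGo : Nat → List Char → Int → Int → PySem.Dict String Int →
    PySem.Dict String Int × List Char × Int
  | 0, cs, _, count, occ => (occ, cs, count)
  | fuel + 1, cs, mult, count, occ =>
    match cs with
    | [] => (occ, [], count)
    | c :: rest =>
      if PySem.Chars.isdigit c then
        ccoGo fuel rest mult (count * 10 + (PySem.Int.ofChars? [c]).getD 0) occ
      else if c = '(' then
        let (occ1, rest1, count1) := ccoGo fuel rest (mult * count) 0 occ
        match rest1 with
        | [] => (occ1, [], count1)                       -- i = n: the while loop ends
        | _ :: rest2 => ccoGo fuel rest2 mult count1 occ1 -- i < n: consume the ')'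
      else if c = ')' then
        (occ, c :: rest, count)
      else
        ccoGo fuel rest mult 0
          (occ.modify (String.singleton c) 0 (· + (if count ≠ 0 then count else 1) * mult))

-- B's top-level while loop: run `go` at multiplier 1, skip an unmatched top-level ')'.
def ccoTop : Nat → List Char → Int → PySem.Dict String Int → PySem.Dict String Int
  | 0, _, _, occ => occ
  | fuel + 1, cs, count, occ =>
    match cs with
    | [] => occ
    | _ :: _ =>
      let (occ1, rest, count1) := ccoGo cs.length cs 1 count occ
      match rest with
      | [] => occ1
      | _ :: rest2 => ccoTop fuel rest2 count1 occ1

def count_character_occurrences_alt (compressed_data : String) : List (String × Int) :=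
  (ccoTop compressed_data.toList.length compressed_data.toList 0 ccoInitB).items

-- ===== PRECONDITION & SPEC =====
-- Pre_ excludes exactly the inputs on which Python A raises KeyError: any character that is
-- neither a digit nor '('/')' nor a lowercase ASCII letter reaches occurrences[char].
def ccoOkChar (c : Char) : Bool :=
  ('0' ≤ c && c ≤ '9') || c == '(' || c == ')' || ('a' ≤ c && c ≤ 'z')
def Pre_count_character_occurrences (compressed_data : String) : Prop :=
  compressed_data.toList.all ccoOkChar = true
instance (compressed_data : String) : Decidable (Pre_count_character_occurrences compressed_data) := by
  unfold Pre_count_character_occurrences; infer_instance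

def pvWitness_count_character_occurrences : String := "2(3ab)c"

def Spec_count_character_occurrences (compressed_data : String) (out : List (String × Int)) : Prop := out = count_character_occurrences_alt compressed_data
instance (compressed_data : String) (out : List (String × Int)) : Decidable (Spec_count_character_occurrences compressed_data out) := by unfold Spec_count_character_occurrences; infer_instance

-- ===== CLAIM (what is proved, stated in full; the proofs are below) =====
def Claim_equal_count_character_occurrences : Prop := ∀ (compressed_data : String), Dom_count_character_occurrences compressed_data → Pre_count_character_occurrences compressed_data → Spec_count_character_occurrences compressed_data (count_character_occurrences compressed_data)

-- ===== LEMMAS AND PROOFS =====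

-- the product of A's multiplier stack
def ccoProd (stack : List Int) : Int := stack.foldl (· * ·) 1

-- both initial dicts are the same 26-key table
lemma cco_init_eq : ccoInitB = ccoInit := by decide

-- A's slice stack[:-1] is dropLast
lemma cco_slice_dropLast (l : List Int) :
    PySem.List.slice l none (some (-1)) = l.dropLast := PySem.List.slice_to_neg_one l

-- folding multiplication from c equals c times the fold from 1
lemma cco_foldl_mul (l : List Int) : ∀ c : Int, l.foldl (· * ·) c = c * l.foldl (· * ·) 1 := by
  induction l with
  | nil => intro c; simp
  | cons x xs ih =>
      intro c
      simp only [List.foldl_cons]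
      rw [ih (c * x), ih (1 * x)]
      ring

lemma cco_prod_append (stack : List Int) (x : Int) :
    ccoProd (stack ++ [x]) = ccoProd stack * x := by
  simp [ccoProd, List.foldl_append]

-- simulation: running B's `go` at the product of A's stack agrees with A's fold over the
-- prefix `go` consumes; `go` stops at an unconsumed ')' (with A's stack unchanged) or at
-- the end of input (A's stack having only grown by unclosed opens `ext`).
lemma cco_go_sim : ∀ (fuel : Nat) (cs : List Char), cs.length ≤ fuel →
    ∀ (stack : List Int) (count : Int) (occ : PySem.Dict String Int),
    ∃ occ1 rest count1 pre,
      ccoGo fuel cs (ccoProd stack) count occ = (occ1, rest, count1) ∧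
      cs = pre ++ rest ∧
      ((rest = [] ∧ ∃ ext, List.foldl ccoStepA (occ, stack, count, 1) pre
            = (occ1, stack ++ ext, count1, 1))
        ∨ (∃ r', rest = ')' :: r' ∧ List.foldl ccoStepA (occ, stack, count, 1) pre
            = (occ1, stack, count1, 1))) := by
  intro fuel
  induction fuel with
  | zero =>
      intro cs hlen stack count occ
      have : cs = [] := List.eq_nil_of_length_eq_zero (Nat.le_zero.mp hlen)
      subst this
      exact ⟨occ, [], count, [], rfl, rfl, Or.inl ⟨rfl, [], by simp⟩⟩
  | succ fuel ih =>
      intro cs hlen stack count occ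
      match cs with
      | [] =>
          exact ⟨occ, [], count, [], rfl, rfl, Or.inl ⟨rfl, [], by simp⟩⟩
      | c :: rest =>
          have hrl : rest.length ≤ fuel := by simpa using Nat.lt_succ_iff.mp (by simpa using hlen)
          by_cases hd : PySem.Chars.isdigit c = true
          · obtain ⟨occ1, rest1, count1, pre1, hgo, hsplit, hcase⟩ :=
              ih rest hrl stack (count * 10 + (PySem.Int.ofChars? [c]).getD 0) occ
            refine ⟨occ1, rest1, count1, c :: pre1, ?_, by simpa using hsplit, ?_⟩
            · simp only [ccoGo, if_pos hd]
              exact hgo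
            · simp only [List.foldl_cons, ccoStepA, if_pos hd]
              exact hcase
          · by_cases h1 : c = '('
            · obtain ⟨occA, restA, countA, preA, hgoA, hsplitA, hcaseA⟩ :=
                ih rest hrl (stack ++ [count]) 0 occ
              rw [cco_prod_append] at hgoA
              have hstepO : ccoStepA (occ, stack, count, 1) c = (occ, stack ++ [count], 0, 1) := by
                simp only [ccoStepA, if_neg hd, if_pos h1]
              rcases hcaseA with ⟨hre, ext, hfoldA⟩ | ⟨r', hre, hfoldA⟩
              · -- inner run hit the end of input: the '(' is unclosed
                subst hre
                refine ⟨occA, [], countA, c :: preA, ?_, by simpa using hsplitA,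
                  Or.inl ⟨rfl, [count] ++ ext, ?_⟩⟩
                · simp only [ccoGo, if_neg hd, if_pos h1]
                  rw [hgoA]
                · simp only [List.foldl_cons, hstepO, hfoldA, List.append_assoc]
              · -- inner run stopped at the matching ')': consume it and continue
                subst hre
                have hr2 : r'.length ≤ fuel := by
                  have : preA.length + (r'.length + 1) = rest.length := by
                    simpa using congrArg List.length hsplitA.symm
                  omega
                have hstepC : ccoStepA (occA, stack ++ [count], countA, 1) ')'
                    = (occA, stack, countA, 1) := by
                  simp only [ccoStepA]
                  rw [if_pos trivial, cco_slice_dropLast, List.dropLast_concat,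
                    if_neg (by decide : ¬ PySem.Chars.isdigit ')' = true),
                    if_neg (by decide : ¬ (')' = '('))]
                obtain ⟨occ1, rest1, count1, pre2, hgo2, hsplit2, hcase2⟩ :=
                  ih r' hr2 stack countA occA
                refine ⟨occ1, rest1, count1, c :: preA ++ ')' :: pre2, ?_, ?_, ?_⟩
                · simp only [ccoGo, if_neg hd, if_pos h1]
                  rw [hgoA]
                  exact hgo2
                · simp [hsplitA, hsplit2]
                · have hcomb : List.foldl ccoStepA (occ, stack, count, 1) (c :: preA ++ ')' :: pre2)
                      = List.foldl ccoStepA (occA, stack, countA, 1) pre2 := by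
                    simp only [List.cons_append, List.foldl_cons, List.foldl_append,
                      hstepO, hfoldA, hstepC]
                  rw [hcomb]
                  exact hcase2
            · by_cases h2 : c = ')'
              · refine ⟨occ, c :: rest, count, [], ?_, by simp, Or.inr ⟨rest, by rw [h2], by simp⟩⟩
                simp only [ccoGo, if_neg hd, if_neg h1, if_pos h2]
              · -- a letter: A rescans the stack, B multiplies by the cumulative product
                obtain ⟨occ1, rest1, count1, pre1, hgo, hsplit, hcase⟩ :=
                  ih rest hrl stack 0
                    (occ.modify (String.singleton c) 0
                      (· + (if count ≠ 0 then count else 1) * ccoProd stack))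
                refine ⟨occ1, rest1, count1, c :: pre1, ?_, by simpa using hsplit, ?_⟩
                · simp only [ccoGo, if_neg hd, if_neg h1, if_neg h2]
                  exact hgo
                · have haddend : stack.foldl (· * ·) (if count ≠ 0 then 1 * count else 1)
                      = (if count ≠ 0 then count else 1) * ccoProd stack := by
                    unfold ccoProd
                    rw [cco_foldl_mul]
                    split_ifs <;> ring
                  have hcnt : (if count ≠ 0 then (0 : Int) else count) = 0 := by
                    split_ifs with h <;> omega
                  simp only [List.foldl_cons, ccoStepA, if_neg hd, if_neg h1, if_neg h2,
                    haddend, hcnt]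
                  exact hcase

-- top level: B's wrapper equals A's whole fold (A's stack is empty at every unmatched ')')
lemma cco_top_sim : ∀ (fuel : Nat) (cs : List Char), cs.length ≤ fuel →
    ∀ (count : Int) (occ : PySem.Dict String Int),
    ccoTop fuel cs count occ = (List.foldl ccoStepA (occ, [], count, 1) cs).1 := by
  intro fuel
  induction fuel with
  | zero =>
      intro cs hlen count occ
      have : cs = [] := List.eq_nil_of_length_eq_zero (Nat.le_zero.mp hlen)
      subst this; rfl
  | succ fuel ih =>
      intro cs hlen count occ
      match cs with
      | [] => rfl
      | c :: rest =>
          obtain ⟨occ1, rest1, count1, pre, hgo, hsplit, hcase⟩ :=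
            cco_go_sim (c :: rest).length (c :: rest) le_rfl [] count occ
          have hgo' : ccoGo (c :: rest).length (c :: rest) 1 count occ
              = (occ1, rest1, count1) := by simpa [ccoProd] using hgo
          rcases hcase with ⟨hre, ext, hfold⟩ | ⟨r', hre, hfold⟩
          · subst hre
            simp only [ccoTop, hgo']
            rw [show c :: rest = pre ++ [] from hsplit, List.append_nil, hfold]
          · subst hre
            have hr2 : r'.length ≤ fuel := by
              have h5 : pre.length + (r'.length + 1) = rest.length + 1 := by
                simpa using congrArg List.length hsplit.symm
              have h6 : rest.length + 1 ≤ fuel + 1 := by simpa using hlen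
              omega
            have hstep : ccoStepA (occ1, ([] : List Int), count1, 1) ')'
                = (occ1, ([] : List Int), count1, 1) := by
              simp only [ccoStepA]
              rw [if_pos trivial, cco_slice_dropLast]
              rfl
            simp only [ccoTop, hgo']
            rw [show c :: rest = pre ++ ')' :: r' from hsplit, List.foldl_append,
              hfold, List.foldl_cons, hstep]
            exact ih r' hr2 count1 occ1

-- ===== VERDICT (by name: the statement is the Claim_ definition above) =====
theorem count_character_occurrences_spec : Claim_equal_count_character_occurrences := by
  intro s _ _
  unfold Spec_count_character_occurrences count_character_occurrences count_character_occurrences_alt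
  rw [cco_init_eq, cco_top_sim s.toList.length s.toList le_rfl 0 ccoInit]
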